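-- pv_equiv track=rewrite | github.com/Deng-Shihao/QModel-Demo | benchmark/inference_speed.py/generation_speed.py | cycle_batch
-- ===== SOURCE A (Python) =====
-- from typing import Dict, Iterable, List, Optional, Sequence
--
-- def cycle_batch(prompts: Sequence[str], batch_size: int, run_index: int) -> List[str]:
--     """Return a batch of prompts, cycling through the list as runs progress."""
--     if batch_size <= 0:
--         raise ValueError("`batch_size` must be a positive integer.")
--     if not prompts:
--         raise ValueError("At least one prompt is required.")
--
--     batch: List[str] = []
--     start = (run_index * batch_size) % len(prompts)
--     for offset in range(batch_size):
--         batch.append(prompts[(start + offset) % len(prompts)])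
--     return batch
-- ===== SOURCE B (Python) =====
-- def cycle_batch(prompts, batch_size, run_index):
--     """Return a batch of prompts, cycling through the list as runs progress."""
--     if batch_size <= 0:
--         raise ValueError("`batch_size` must be a positive integer.")
--     if not prompts:
--         raise ValueError("At least one prompt is required.")
--     start = (run_index * batch_size) % len(prompts)
--     repeated = list(prompts) * (batch_size // len(prompts) + 2)
--     return repeated[start:start + batch_size]
-- ===== Notes on version B (the rewrite author's own statement) =====
-- stated objective: alternative
-- what changed: Replaces the per-element modulo-indexing loop with building the whole cyclic window at once by list repetition and a single slice.
import Mathlib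
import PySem

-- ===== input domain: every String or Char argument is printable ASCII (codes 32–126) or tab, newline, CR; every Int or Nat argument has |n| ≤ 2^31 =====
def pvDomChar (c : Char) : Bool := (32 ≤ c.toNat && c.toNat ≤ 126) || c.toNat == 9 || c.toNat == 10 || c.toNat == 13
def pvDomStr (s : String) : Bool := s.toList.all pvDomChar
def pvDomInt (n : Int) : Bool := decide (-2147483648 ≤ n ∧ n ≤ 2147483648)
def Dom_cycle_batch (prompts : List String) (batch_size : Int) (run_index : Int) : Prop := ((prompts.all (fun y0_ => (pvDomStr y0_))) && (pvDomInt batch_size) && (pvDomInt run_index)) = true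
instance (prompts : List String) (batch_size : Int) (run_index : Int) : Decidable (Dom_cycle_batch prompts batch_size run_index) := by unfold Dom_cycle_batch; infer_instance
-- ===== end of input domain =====

-- B builds the cyclic batch by list repetition and a single slice instead of indexing each position modulo length (alternative decomposition).
-- Pre_ excludes exactly the inputs on which the Python raises ValueError (batch_size <= 0 or empty prompts).


-- ===== PORT A =====
-- where the Python raises ValueError (batch_size <= 0 or empty prompts) the port returns []; Pre_ excludes exactly those inputs
def cycle_batch (prompts : List String) (batch_size : Int) (run_index : Int) : List String :=
  if batch_size ≤ 0 then []
  else if prompts = [] then []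
  else
    let start := PySem.Int.mod (run_index * batch_size) (prompts.length : Int)
    (PySem.List.pyRange 0 batch_size 1).foldl
      (fun batch offset =>
        batch ++ [PySem.List.pyGetD prompts (PySem.Int.mod (start + offset) (prompts.length : Int)) ""])
      []

-- ===== PORT B =====
-- same raise guards (port returns [] there, excluded by Pre_); then list repetition + one slice, as in Source B
def cycle_batch_alt (prompts : List String) (batch_size : Int) (run_index : Int) : List String :=
  if batch_size ≤ 0 then []
  else if prompts = [] then []
  else
    let start := PySem.Int.mod (run_index * batch_size) (prompts.length : Int)
    let repeated := (List.replicate (PySem.Int.floordiv batch_size (prompts.length : Int) + 2).toNat prompts).flatten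
    PySem.List.slice repeated (some start) (some (start + batch_size))

-- ===== PRECONDITION & SPEC =====
-- Pre_ excludes exactly the inputs on which Python A raises ValueError: batch_size <= 0 or an empty prompt list
def Pre_cycle_batch (prompts : List String) (batch_size : Int) (run_index : Int) : Prop :=
  0 < batch_size ∧ prompts ≠ []
instance (prompts : List String) (batch_size : Int) (run_index : Int) : Decidable (Pre_cycle_batch prompts batch_size run_index) := by unfold Pre_cycle_batch; infer_instance
def pvWitness_cycle_batch : List String × Int × Int := (["a", "b", "c"], 4, 2)

def Spec_cycle_batch (prompts : List String) (batch_size : Int) (run_index : Int) (out : List String) : Prop := out = cycle_batch_alt prompts batch_size run_index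
instance (prompts : List String) (batch_size : Int) (run_index : Int) (out : List String) : Decidable (Spec_cycle_batch prompts batch_size run_index out) := by unfold Spec_cycle_batch; infer_instance

-- ===== CLAIM (what is proved, stated in full; the proofs are below) =====
def Claim_equal_cycle_batch : Prop := ∀ (prompts : List String) (batch_size : Int) (run_index : Int), Dom_cycle_batch prompts batch_size run_index → Pre_cycle_batch prompts batch_size run_index → Spec_cycle_batch prompts batch_size run_index (cycle_batch prompts batch_size run_index)

-- ===== LEMMAS AND PROOFS =====

-- indexing into a K-fold repetition is indexing modulo the block length
theorem getElem?_flatten_replicate {α : Type} (L : List α) (K i : Nat) (hi : i < K * L.length) :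
    ((List.replicate K L).flatten)[i]? = L[i % L.length]? := by
  induction K generalizing i with
  | zero => omega
  | succ K ih =>
    have hn : 0 < L.length := by
      rcases Nat.eq_zero_or_pos L.length with h0 | h0
      · rw [h0, Nat.mul_zero] at hi; omega
      · exact h0
    rw [List.replicate_succ, List.flatten_cons]
    by_cases h : i < L.length
    · rw [List.getElem?_append_left h, Nat.mod_eq_of_lt h]
    · have h2 : i - L.length < K * L.length := by
        have h5 : (K + 1) * L.length = K * L.length + L.length := by ring
        omega
      rw [List.getElem?_append_right (by omega), ih _ h2]
      congr 1
      conv_rhs => rw [show i = L.length + (i - L.length) by omega]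
      rw [Nat.add_mod_left]

-- the per-index-modulo window equals the drop/take of the repeated list (all in Nat)
theorem window_eq_take_drop_flatten (prompts : List String) (b s : Nat)
    (hn : 0 < prompts.length) (hs : s < prompts.length) :
    (List.range b).map (fun k => prompts.getD ((s + k) % prompts.length) "") =
      (((List.replicate (b / prompts.length + 2) prompts).flatten).drop s).take b := by
  apply List.ext_getElem?
  intro i
  rw [List.getElem?_take, List.getElem?_drop, List.getElem?_map]
  by_cases hib : i < b
  · have hlt : s + i < (b / prompts.length + 2) * prompts.length := by
      have h1 := Nat.div_add_mod b prompts.length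
      have h2 := Nat.mod_lt b hn
      have h3 := Nat.add_mul (b / prompts.length) 2 prompts.length
      have h4 := Nat.mul_comm prompts.length (b / prompts.length)
      omega
    rw [List.getElem?_range hib, getElem?_flatten_replicate _ _ _ hlt]
    have hm : (s + i) % prompts.length < prompts.length := Nat.mod_lt _ hn
    rw [List.getElem?_eq_getElem hm]
    simp [List.getD_eq_getElem?_getD, List.getElem?_eq_getElem hm, hib]
  · rw [List.getElem?_eq_none (by simpa using Nat.le_of_not_lt hib), if_neg hib]
    rfl

theorem cycle_batch_spec : Claim_equal_cycle_batch := by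
  intro prompts batch_size run_index _ hpre
  obtain ⟨hb, hne⟩ := hpre
  unfold Spec_cycle_batch cycle_batch cycle_batch_alt
  have h1 : ¬ batch_size ≤ 0 := by omega
  rw [if_neg h1, if_neg hne, if_neg h1, if_neg hne]
  have hn : 0 < prompts.length := List.length_pos_iff.mpr hne
  have hnI : (0 : Int) < (prompts.length : Int) := by exact_mod_cast hn
  have hbs : batch_size = ((batch_size.toNat : Nat) : Int) := (Int.toNat_of_nonneg (by omega)).symm
  have hs0 := PySem.Int.mod_nonneg (run_index * batch_size) hnI
  have hslt := PySem.Int.mod_lt (run_index * batch_size) hnI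
  have hsI : PySem.Int.mod (run_index * batch_size) (prompts.length : Int)
      = (((PySem.Int.mod (run_index * batch_size) (prompts.length : Int)).toNat : Nat) : Int) :=
    (Int.toNat_of_nonneg hs0).symm
  set b := batch_size.toNat with hbdef
  set s := (PySem.Int.mod (run_index * batch_size) (prompts.length : Int)).toNat with hsdef
  have hs : s < prompts.length := by omega
  -- A side
  conv_lhs => rw [hbs, PySem.List.pyRange_zero_natCast, PySem.List.foldl_append_singleton_eq_map]
  -- B side
  conv_rhs => rw [hsI, hbs, PySem.Int.floordiv_natCast, PySem.List.slice_natCast_add]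
  rw [show (((b / prompts.length : Nat) : Int) + 2) = (((b / prompts.length + 2 : Nat)) : Int) by push_cast; ring,
    Int.toNat_natCast]
  rw [← window_eq_take_drop_flatten prompts b s hn hs]
  rw [List.nil_append, List.map_map]
  apply List.map_congr_left
  intro k _
  simp only [Function.comp]
  rw [show PySem.Int.mod (run_index * ((b : Nat) : Int)) (prompts.length : Int) = ((s : Nat) : Int) from by rw [← hbs]; exact hsI,
    show (((s : Nat) : Int) + ((k : Nat) : Int)) = (((s + k : Nat) : Nat) : Int) by push_cast; ring,
    PySem.Int.mod_natCast, PySem.List.pyGetD_natCast]
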